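-- pv_equiv track=rewrite | github.com/Yuuuuuu-xue/DataStructures_and_Algorithms | two_pointers/get_equal_substrings_within_budget/solution.py | equalSubstring
-- ===== SOURCE A (Python) =====
-- def equalSubstring(s: str, t: str, maxCost: int) -> int:
--     left = 0
--     n = len(s)
--     max_len = 0
--     curr_cost = 0
--     for right in range(n):
--         curr_cost += abs(ord(s[right]) - ord(t[right]))
--
--         while curr_cost > maxCost:
--             curr_cost -= abs(ord(s[left]) - ord(t[left]))
--             left += 1
--
--         max_len = max(max_len, right - left + 1)
--
--     return max_len
-- ===== SOURCE B (Python) =====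
-- def equalSubstring(s: str, t: str, maxCost: int) -> int:
--     pre = [0]
--     for i in range(len(s)):
--         pre.append(pre[-1] + abs(ord(s[i]) - ord(t[i])))
--     best = 0
--     for right in range(len(s)):
--         target = pre[right + 1] - maxCost
--         lo, hi = 0, right + 2
--         while lo < hi:
--             mid = (lo + hi) // 2
--             if pre[mid] < target:
--                 lo = mid + 1
--             else:
--                 hi = mid
--         best = max(best, right - lo + 1)
--     return best
-- ===== Notes on version B (the rewrite author's own statement) =====
-- stated objective: alternative
-- what changed: Replaces A's sliding-window two-pointer crawl with a precomputed prefix-cost table plus a hand-written binary search (bisect_left) per right endpoint for the smallest affordable left.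
import Mathlib
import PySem

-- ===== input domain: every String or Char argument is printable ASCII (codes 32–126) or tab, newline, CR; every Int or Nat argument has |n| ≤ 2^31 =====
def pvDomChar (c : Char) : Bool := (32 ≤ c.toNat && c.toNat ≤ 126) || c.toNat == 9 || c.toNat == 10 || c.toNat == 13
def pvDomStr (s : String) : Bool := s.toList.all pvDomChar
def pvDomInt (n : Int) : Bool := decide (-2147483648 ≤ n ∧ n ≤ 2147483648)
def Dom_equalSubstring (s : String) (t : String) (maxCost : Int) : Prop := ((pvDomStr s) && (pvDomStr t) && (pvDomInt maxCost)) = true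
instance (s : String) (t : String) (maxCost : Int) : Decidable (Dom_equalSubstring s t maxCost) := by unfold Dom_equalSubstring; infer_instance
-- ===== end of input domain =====

-- B replaces A's two-pointer crawl by a prefix-cost table with a per-index binary search
-- (objective: alternative decomposition, not faster; return-value equivalence only).

-- ===== PORT A =====
-- |ord s[i] - ord t[i]|; the 0 default is only reached out of range, where Python raises (excluded by Pre_)
def pvCostAtA (s t : String) (i : Nat) : Int :=
  match s.toList[i]?, t.toList[i]? with
  | some a, some b => |(a.toNat : Int) - (b.toNat : Int)|
  | _, _ => 0
-- the inner `while curr_cost > maxCost` loop; the fuel argument only makes the recursion structural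
-- (inside Pre_ it is called with more fuel than the loop can consume, so the 0-fuel arm is never reached)
def eqsubShrink (s t : String) (maxCost : Int) (n : Nat) : Nat → Nat → Int → Nat × Int
  | 0, left, curr => (left, curr)
  | fuel + 1, left, curr =>
    if curr ≤ maxCost then (left, curr)
    else if left < n then eqsubShrink s t maxCost n fuel (left + 1) (curr - pvCostAtA s t left)
    else (left, curr)
-- the outer `for right in range(n)` loop carrying (left, curr_cost, max_len), again with surplus fuel
def eqsubGo (s t : String) (maxCost : Int) (n : Nat) : Nat → Nat → Nat → Int → Int → Int
  | 0, _, _, _, maxLen => maxLen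
  | fuel + 1, right, left, curr, maxLen =>
    if right < n then
      eqsubGo s t maxCost n fuel (right + 1)
        (eqsubShrink s t maxCost n (n + 1 - left) left (curr + pvCostAtA s t right)).1
        (eqsubShrink s t maxCost n (n + 1 - left) left (curr + pvCostAtA s t right)).2
        (max maxLen ((right : Int) - ((eqsubShrink s t maxCost n (n + 1 - left) left (curr + pvCostAtA s t right)).1 : Int) + 1))
    else maxLen
def equalSubstring (s : String) (t : String) (maxCost : Int) : Int :=
  eqsubGo s t maxCost s.toList.length (s.toList.length + 1) 0 0 0 0

-- ===== PORT B =====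
def pvCostAtB (s t : String) (i : Nat) : Int :=
  match s.toList[i]?, t.toList[i]? with
  | some a, some b => |(a.toNat : Int) - (b.toNat : Int)|
  | _, _ => 0
-- pre = [0]; for i in range(len(s)): pre.append(pre[-1] + cost i)
def eqsubPreList (s t : String) : List Int :=
  (List.range s.toList.length).foldl (fun pre i => pre ++ [pre.getLastD 0 + pvCostAtB s t i]) [0]
-- hand-written bisect_left of Source B (fuel makes the halving loop structural; never exhausted at the call below)
def eqsubBisectF (pre : List Int) (target : Int) : Nat → Nat → Nat → Nat
  | 0, lo, _ => lo
  | fuel + 1, lo, hi =>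
    if lo < hi then
      if pre.getD ((lo + hi) / 2) 0 < target then eqsubBisectF pre target fuel ((lo + hi) / 2 + 1) hi
      else eqsubBisectF pre target fuel lo ((lo + hi) / 2)
    else lo
def eqsubBisect (pre : List Int) (target : Int) (lo hi : Nat) : Nat :=
  eqsubBisectF pre target (hi - lo + 1) lo hi
def equalSubstring_alt (s : String) (t : String) (maxCost : Int) : Int :=
  (List.range s.toList.length).foldl
    (fun best (right : Nat) =>
      max best ((right : Int) -
        ((eqsubBisect (eqsubPreList s t) ((eqsubPreList s t).getD (right + 1) 0 - maxCost) 0 (right + 2)) : Int) + 1)) 0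

-- ===== PRECONDITION & SPEC =====
-- Pre_ excludes exactly the inputs where the Python A raises IndexError and returns nothing: t shorter
-- than s (t[right] out of range), and a negative budget with nonempty s (the shrink loop walks left past
-- the end of s); everywhere else A returns normally.
def Pre_equalSubstring (s : String) (t : String) (maxCost : Int) : Prop :=
  s.toList.length ≤ t.toList.length ∧ (s.toList.length = 0 ∨ 0 ≤ maxCost)
instance (s : String) (t : String) (maxCost : Int) : Decidable (Pre_equalSubstring s t maxCost) := by
  unfold Pre_equalSubstring; infer_instance

def pvWitness_equalSubstring : String × String × Int := ("abcd", "bcdf", 3)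

def Spec_equalSubstring (s : String) (t : String) (maxCost : Int) (out : Int) : Prop := out = equalSubstring_alt s t maxCost
instance (s : String) (t : String) (maxCost : Int) (out : Int) : Decidable (Spec_equalSubstring s t maxCost out) := by unfold Spec_equalSubstring; infer_instance

-- ===== CLAIM (what is proved, stated in full; the proofs are below) =====
def Claim_equal_equalSubstring : Prop := ∀ (s : String) (t : String) (maxCost : Int), Dom_equalSubstring s t maxCost → Pre_equalSubstring s t maxCost → Spec_equalSubstring s t maxCost (equalSubstring s t maxCost)

-- ===== LEMMAS AND PROOFS =====

-- prefix cost sums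
def pvP (s t : String) (i : Nat) : Int := ((List.range i).map (pvCostAtA s t)).sum

theorem pvCost_nonneg (s t : String) (i : Nat) : 0 ≤ pvCostAtA s t i := by
  unfold pvCostAtA
  cases s.toList[i]? <;> cases t.toList[i]? <;> simp [abs_nonneg]

theorem pvP_succ (s t : String) (i : Nat) : pvP s t (i + 1) = pvP s t i + pvCostAtA s t i := by
  simp [pvP, List.range_succ]

theorem pvP_mono (s t : String) {i j : Nat} (h : i ≤ j) : pvP s t i ≤ pvP s t j := by
  induction j with
  | zero => exact (Nat.le_zero.mp h) ▸ le_refl _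
  | succ j ih =>
    rcases Nat.lt_or_ge i (j+1) with h' | h'
    · have := ih (by omega)
      have := pvCost_nonneg s t j
      rw [pvP_succ]; omega
    · have : i = j + 1 := by omega
      subst this; rfl

theorem preList_eq (s t : String) :
    eqsubPreList s t = (List.range (s.toList.length + 1)).map (pvP s t) := by
  unfold eqsubPreList
  have key : ∀ k, (List.range k).foldl (fun pre i => pre ++ [pre.getLastD 0 + pvCostAtB s t i]) [0]
      = (List.range (k + 1)).map (pvP s t) := by
    intro k
    induction k with
    | zero => simp [pvP]
    | succ k ih =>
      rw [List.range_succ, List.foldl_append, ih]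
      rw [show List.range (k+1+1) = List.range (k+1) ++ [k+1] from List.range_succ]
      simp only [List.foldl_cons, List.foldl_nil, List.map_append, List.map_cons, List.map_nil]
      congr 1
      have hlast : ((List.range (k+1)).map (pvP s t)).getLastD 0 = pvP s t k := by
        rw [show List.range (k+1) = List.range k ++ [k] from List.range_succ]
        simp
      rw [hlast]
      have : pvCostAtB s t k = pvCostAtA s t k := rfl
      rw [this, ← pvP_succ]
  exact key _

theorem preList_getD (s t : String) {i : Nat} (h : i ≤ s.toList.length) :
    (eqsubPreList s t).getD i 0 = pvP s t i := by
  rw [preList_eq]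
  rw [List.getD_eq_getElem?_getD]
  have h' : i < s.length + 1 := by
    have : s.toList.length = s.length := String.length_toList
    omega
  simp [h']

-- bisect specification: the returned index splits pre at target
theorem bisect_spec (s t : String) (target : Int) :
    ∀ fuel lo hi, hi - lo < fuel → lo ≤ hi → hi ≤ s.toList.length + 1 →
    (∀ k, k < lo → pvP s t k < target) →
    lo ≤ eqsubBisectF (eqsubPreList s t) target fuel lo hi ∧
    eqsubBisectF (eqsubPreList s t) target fuel lo hi ≤ hi ∧
    (∀ k, k < eqsubBisectF (eqsubPreList s t) target fuel lo hi → pvP s t k < target) ∧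
    (eqsubBisectF (eqsubPreList s t) target fuel lo hi < hi →
      target ≤ pvP s t (eqsubBisectF (eqsubPreList s t) target fuel lo hi)) := by
  intro fuel
  induction fuel with
  | zero => intro lo hi h; omega
  | succ fuel ih =>
    intro lo hi hfuel hlohi hhi hbelow
    rw [eqsubBisectF]
    by_cases hlt : lo < hi
    · rw [if_pos hlt]
      set mid := (lo + hi) / 2 with hmid
      have hmlo : lo ≤ mid := by omega
      have hmhi : mid < hi := by omega
      have hmn : mid ≤ s.toList.length := by omega
      rw [preList_getD s t hmn]
      by_cases hc : pvP s t mid < target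
      · rw [if_pos hc]
        have hrec := ih (mid + 1) hi (by omega) (by omega) hhi
          (by intro k hk
              rcases Nat.lt_or_ge k lo with h' | h'
              · exact hbelow k h'
              · exact lt_of_le_of_lt (pvP_mono s t (show k ≤ mid by omega)) hc)
        exact ⟨by omega, hrec.2.1, hrec.2.2.1, hrec.2.2.2⟩
      · rw [if_neg hc]
        have hrec := ih lo mid (by omega) (by omega) (by omega) hbelow
        refine ⟨hrec.1, by omega, hrec.2.2.1, ?_⟩
        intro _
        rcases Nat.lt_or_ge (eqsubBisectF (eqsubPreList s t) target fuel lo mid) mid with h' | h'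
        · exact hrec.2.2.2 h'
        · have : eqsubBisectF (eqsubPreList s t) target fuel lo mid = mid := by omega
          rw [this]; omega
    · rw [if_neg hlt]
      exact ⟨le_refl _, by omega, hbelow, fun h => absurd h hlt⟩

-- shrink specification: the loop stops at the least valid left endpoint
theorem shrink_spec (s t : String) (maxCost : Int) (hmc : 0 ≤ maxCost) (r : Nat)
    (hr : r < s.toList.length) :
    ∀ fuel l, r + 1 - l < fuel → l ≤ r + 1 →
    (∀ k, k < l → maxCost < pvP s t (r + 1) - pvP s t k) →
    (eqsubShrink s t maxCost s.toList.length fuel l (pvP s t (r + 1) - pvP s t l)).1 ≤ r + 1 ∧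
    (eqsubShrink s t maxCost s.toList.length fuel l (pvP s t (r + 1) - pvP s t l)).2
      = pvP s t (r + 1) - pvP s t (eqsubShrink s t maxCost s.toList.length fuel l (pvP s t (r + 1) - pvP s t l)).1 ∧
    pvP s t (r + 1) - pvP s t (eqsubShrink s t maxCost s.toList.length fuel l (pvP s t (r + 1) - pvP s t l)).1 ≤ maxCost ∧
    (∀ k, k < (eqsubShrink s t maxCost s.toList.length fuel l (pvP s t (r + 1) - pvP s t l)).1 →
      maxCost < pvP s t (r + 1) - pvP s t k) := by
  intro fuel
  induction fuel with
  | zero => intro l h; omega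
  | succ fuel ih =>
    intro l hfuel hl hbelow
    rw [eqsubShrink]
    by_cases hok : pvP s t (r + 1) - pvP s t l ≤ maxCost
    · rw [if_pos hok]
      exact ⟨hl, rfl, hok, hbelow⟩
    · have hlr : l < r + 1 := by
        rcases Nat.lt_or_ge l (r + 1) with h' | h'
        · exact h'
        · exfalso; have heq : l = r + 1 := by omega
          subst heq; omega
      have hln : l < s.toList.length := by omega
      rw [if_neg hok, if_pos hln]
      have harg : pvP s t (r + 1) - pvP s t l - pvCostAtA s t l = pvP s t (r + 1) - pvP s t (l + 1) := by
        have := pvP_succ s t l; omega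
      rw [harg]
      exact ih (l + 1) (by omega) (by omega)
        (by intro k hk
            rcases Nat.lt_or_ge k l with h' | h'
            · exact hbelow k h'
            · have : k = l := by omega
              subst this; omega)

-- uniqueness of the minimal left endpoint
theorem min_unique (s t : String) (maxCost : Int) (R : Nat) {l1 l2 : Nat}
    (h1v : pvP s t R - pvP s t l1 ≤ maxCost) (h1m : ∀ k, k < l1 → maxCost < pvP s t R - pvP s t k)
    (h2v : pvP s t R - pvP s t l2 ≤ maxCost) (h2m : ∀ k, k < l2 → maxCost < pvP s t R - pvP s t k) :
    l1 = l2 := by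
  rcases lt_trichotomy l1 l2 with h | h | h
  · have := h2m l1 h; omega
  · exact h
  · have := h1m l2 h; omega

-- the main loop correspondence: A's crawl computes B's per-right maxima
theorem go_eq (s t : String) (maxCost : Int) (hmc : 0 ≤ maxCost) :
    ∀ fuel r l ml, s.toList.length - r < fuel → l ≤ r →
    (∀ k, k < l → maxCost < pvP s t r - pvP s t k) →
    eqsubGo s t maxCost s.toList.length fuel r l (pvP s t r - pvP s t l) ml =
    (List.range' r (s.toList.length - r)).foldl
      (fun best (right : Nat) =>
        max best ((right : Int) -
          (eqsubBisect (eqsubPreList s t) ((eqsubPreList s t).getD (right + 1) 0 - maxCost) 0 (right + 2) : Int) + 1)) ml := by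
  intro fuel
  induction fuel with
  | zero => intro r l ml h; omega
  | succ fuel ih =>
    intro r l ml hfuel hl hbelow
    rw [eqsubGo]
    by_cases hr : r < s.toList.length
    · rw [if_pos hr]
      have harg : pvP s t r - pvP s t l + pvCostAtA s t r = pvP s t (r + 1) - pvP s t l := by
        rw [pvP_succ]; ring
      rw [harg]
      have hbelow' : ∀ k, k < l → maxCost < pvP s t (r + 1) - pvP s t k := by
        intro k hk
        have := hbelow k hk
        have := pvP_mono s t (show r ≤ r + 1 by omega)
        omega
      have hsh := shrink_spec s t maxCost hmc r hr (s.toList.length + 1 - l) l (by omega) (by omega) hbelow'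
      set p := eqsubShrink s t maxCost s.toList.length (s.toList.length + 1 - l) l (pvP s t (r + 1) - pvP s t l) with hp
      -- bisect side
      have htarget : (eqsubPreList s t).getD (r + 1) 0 - maxCost = pvP s t (r + 1) - maxCost := by
        rw [preList_getD s t (by omega)]
      have hbs := bisect_spec s t (pvP s t (r + 1) - maxCost) (r + 2 - 0 + 1) 0 (r + 2) (by omega) (by omega)
        (by omega) (by intro k hk; omega)
      set m := eqsubBisectF (eqsubPreList s t) (pvP s t (r + 1) - maxCost) (r + 2 - 0 + 1) 0 (r + 2) with hm
      have hmlt : m < r + 2 := by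
        rcases Nat.lt_or_ge m (r + 2) with h' | h'
        · exact h'
        · exfalso
          have := hbs.2.2.1 (r + 1) (by omega)
          omega
      have hmval := hbs.2.2.2 hmlt
      have hmmin : ∀ k, k < m → maxCost < pvP s t (r + 1) - pvP s t k := by
        intro k hk; have := hbs.2.2.1 k hk; omega
      have heq : p.1 = m :=
        min_unique s t maxCost (r + 1) (by omega) hsh.2.2.2 (by omega) hmmin
      -- fold step on the B side
      have hlen : s.toList.length - r = (s.toList.length - (r + 1)) + 1 := by omega
      rw [hlen, List.range'_succ, List.foldl_cons]
      rw [htarget]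
      rw [show eqsubBisect (eqsubPreList s t) (pvP s t (r + 1) - maxCost) 0 (r + 2)
            = m from rfl]
      rw [← heq]
      rw [hsh.2.1]
      exact ih (r + 1) p.1 _ (by omega) (by omega) hsh.2.2.2
    · rw [if_neg hr]
      have : s.toList.length - r = 0 := by omega
      rw [this]
      simp

theorem eqsub_main (s t : String) (maxCost : Int)
    (hpre : s.toList.length ≤ t.toList.length ∧ (s.toList.length = 0 ∨ 0 ≤ maxCost)) :
    equalSubstring s t maxCost = equalSubstring_alt s t maxCost := by
  rcases hpre with ⟨hlen, h0 | hmc⟩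
  · rw [equalSubstring, equalSubstring_alt, h0]
    rfl
  · rw [equalSubstring, equalSubstring_alt]
    have h := go_eq s t maxCost hmc (s.toList.length + 1) 0 0 0 (by omega) (le_refl 0) (by intro k hk; omega)
    have h00 : pvP s t 0 - pvP s t 0 = 0 := by ring
    rw [h00] at h
    rw [h]
    rw [show s.toList.length - 0 = s.toList.length from rfl, ← List.range_eq_range']

-- ===== VERDICT (by name: the statement is the Claim_ definition above) =====
theorem equalSubstring_spec : Claim_equal_equalSubstring := by
  intro s t maxCost _ hpre
  unfold Spec_equalSubstring
  exact eqsub_main s t maxCost hpre
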